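-- pv_equiv track=rewrite | github.com/chyyd/rehabilitation-assistant | backend/utils/text_processor.py | optimize_phrases_for_ai
-- ===== SOURCE A (Python) =====
-- from typing import List
--
-- def optimize_phrases_for_ai(phrases: List[str], max_content_length: int = 8000) -> str:
--     """
--     将语句列表格式化为适合AI处理的文本
--
--     Args:
--         phrases: 语句列表
--         max_content_length: 最大内容长度（避免token超限）
--
--     Returns:
--         格式化后的文本
--     """
--     formatted_lines = []
--     current_length = 0
--
--     for i, phrase in enumerate(phrases, 1):
--         line = f"{i}. {phrase}"
--         if current_length + len(line) > max_content_length: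
--             break
--         formatted_lines.append(line)
--         current_length += len(line)
--
--     return "\n".join(formatted_lines)
-- ===== SOURCE B (Python) =====
-- from typing import List
--
-- def optimize_phrases_for_ai(phrases: List[str], max_content_length: int = 8000) -> str:
--     # Build all numbered lines first, then cut the longest prefix whose
--     # cumulative line length (newlines not counted) stays within the limit.
--     lines = [f"{i}. {p}" for i, p in enumerate(phrases, 1)]
--     totals = []
--     running = 0
--     for l in lines:
--         running += len(l)
--         totals.append(running)
--     cutoff = next((i for i, t in enumerate(totals) if t > max_content_length), len(lines))
--     return "\n".join(lines[:cutoff])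
-- ===== Notes on version B (the rewrite author's own statement) =====
-- stated objective: alternative
-- what changed: Replaces A's single format-check-accumulate-break loop with a build-all pass (format every line), a cumulative-sum pass, and a first-overflow prefix cut followed by one join.
import Mathlib
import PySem

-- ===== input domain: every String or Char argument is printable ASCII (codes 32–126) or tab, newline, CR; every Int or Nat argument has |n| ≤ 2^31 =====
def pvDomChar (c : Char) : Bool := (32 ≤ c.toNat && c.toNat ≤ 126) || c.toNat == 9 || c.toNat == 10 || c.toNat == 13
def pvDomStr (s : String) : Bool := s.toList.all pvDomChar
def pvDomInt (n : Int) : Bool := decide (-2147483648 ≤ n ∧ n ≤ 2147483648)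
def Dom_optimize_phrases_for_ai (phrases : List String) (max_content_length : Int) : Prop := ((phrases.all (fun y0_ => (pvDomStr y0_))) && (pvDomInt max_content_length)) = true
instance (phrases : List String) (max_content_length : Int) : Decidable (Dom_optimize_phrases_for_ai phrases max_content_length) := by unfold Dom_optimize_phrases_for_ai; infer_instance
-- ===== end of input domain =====

-- B formats all lines first, then cuts at the first cumulative-length overflow; A breaks inside one loop. Same return value everywhere.

-- ===== PORT A =====
-- the for-loop over `phrases` with (i, current_length, formatted_lines) as state; break returns the accumulator
def pvAGo (m : Int) (ps : List String) (i cur : Int) (acc : List String) : List String :=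
  match ps with
  | [] => acc
  | p :: rest =>
    let line := PySem.Int.toStr i ++ ". " ++ p
    if cur + PySem.Str.len line > m then acc
    else pvAGo m rest (i + 1) (cur + PySem.Str.len line) (acc ++ [line])

def optimize_phrases_for_ai (phrases : List String) (max_content_length : Int) : String :=
  PySem.Str.join "\n" (pvAGo max_content_length phrases 1 0 [])

-- ===== PORT B =====
-- [f"{i}. {p}" for i, p in enumerate(phrases, 1)]
def pvBLines (ps : List String) (i : Int) : List String :=
  match ps with
  | [] => []
  | p :: rest => (PySem.Int.toStr i ++ ". " ++ p) :: pvBLines rest (i + 1)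

-- totals: running cumulative sums of the line lengths
def pvBAccum (xs : List Int) (running : Int) : List Int :=
  match xs with
  | [] => []
  | x :: rest => (running + x) :: pvBAccum rest (running + x)

-- next((i for i, t in enumerate(totals) if t > m), default)
def pvBFirstOver (ts : List Int) (m : Int) (idx : Nat) : Nat :=
  match ts with
  | [] => idx
  | t :: rest => if t > m then idx else pvBFirstOver rest m (idx + 1)

def optimize_phrases_for_ai_alt (phrases : List String) (max_content_length : Int) : String :=
  let lines := pvBLines phrases 1
  let totals := pvBAccum (lines.map PySem.Str.len) 0
  let cutoff := pvBFirstOver totals max_content_length (pvBFirstOver [] max_content_length 0)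
  PySem.Str.join "\n" (lines.take cutoff)

-- ===== PRECONDITION & SPEC =====
def Spec_optimize_phrases_for_ai (phrases : List String) (max_content_length : Int) (out : String) : Prop := out = optimize_phrases_for_ai_alt phrases max_content_length
instance (phrases : List String) (max_content_length : Int) (out : String) : Decidable (Spec_optimize_phrases_for_ai phrases max_content_length out) := by unfold Spec_optimize_phrases_for_ai; infer_instance

-- ===== CLAIM (what is proved, stated in full; the proofs are below) =====
def Claim_equal_optimize_phrases_for_ai : Prop := ∀ (phrases : List String) (max_content_length : Int), Dom_optimize_phrases_for_ai phrases max_content_length → Spec_optimize_phrases_for_ai phrases max_content_length (optimize_phrases_for_ai phrases max_content_length)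

-- ===== LEMMAS AND PROOFS =====

-- common reference: greedy longest prefix of lines fitting within m starting from length cur
def pvCut (ls : List String) (cur m : Int) : List String :=
  match ls with
  | [] => []
  | l :: rest => if cur + PySem.Str.len l > m then [] else l :: pvCut rest (cur + PySem.Str.len l) m

theorem pvAGo_eq_cut (m : Int) (ps : List String) : ∀ (i cur : Int) (acc : List String),
    pvAGo m ps i cur acc = acc ++ pvCut (pvBLines ps i) cur m := by
  induction ps with
  | nil => intro i cur acc; simp [pvAGo, pvBLines, pvCut]
  | cons p rest ih =>
    intro i cur acc
    simp only [pvAGo, pvBLines, pvCut]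
    split
    · simp
    · rw [ih]; simp

theorem pvBFirstOver_shift (ts : List Int) (m : Int) : ∀ (n : Nat),
    pvBFirstOver ts m n = n + pvBFirstOver ts m 0 := by
  induction ts with
  | nil => intro n; simp [pvBFirstOver]
  | cons t rest ih =>
    intro n
    simp only [pvBFirstOver]
    split
    · simp
    · rw [ih (n + 1), ih 1]; omega

theorem take_firstOver_eq_cut (m : Int) (ls : List String) : ∀ (cur : Int),
    ls.take (pvBFirstOver (pvBAccum (ls.map PySem.Str.len) cur) m 0) = pvCut ls cur m := by
  induction ls with
  | nil => intro cur; simp [pvBAccum, pvBFirstOver, pvCut]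
  | cons l rest ih =>
    intro cur
    simp only [List.map_cons, pvBAccum, pvBFirstOver, pvCut]
    split
    · simp
    · rw [pvBFirstOver_shift _ _ 1]
      simp only [Nat.add_comm 1, List.take_succ_cons]
      rw [ih (cur + PySem.Str.len l)]

-- ===== VERDICT (by name: the statement is the Claim_ definition above) =====
theorem optimize_phrases_for_ai_spec : Claim_equal_optimize_phrases_for_ai := by
  intro phrases m _
  unfold Spec_optimize_phrases_for_ai optimize_phrases_for_ai
  rw [pvAGo_eq_cut]
  show PySem.Str.join "\n" ([] ++ pvCut (pvBLines phrases 1) 0 m) =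
    PySem.Str.join "\n" ((pvBLines phrases 1).take
      (pvBFirstOver (pvBAccum ((pvBLines phrases 1).map PySem.Str.len) 0) m 0))
  rw [take_firstOver_eq_cut]
  simp
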